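-- pv_equiv track=rewrite | github.com/lyds214/Python-Project | DNA Analyzer.py | find_optimal_indel_position
-- ===== SOURCE A (Python) =====
-- def remove_indel(sequence, index):
--     return sequence[:int(index)] + sequence[int(index + 1):]
--
-- def insert_indel(sequence, index):
--     return sequence[:int(index)] + "-" + sequence[int(index):]
--
-- def count_matches(sequence1, sequence2):
--     counter = 0
--
--     for x in range(min(len(sequence1), len(sequence2))):
--         if (sequence1[x].lower() == sequence2[x].lower()) and (sequence1[x] != "-"):
--             counter += 1
--     return counter
--
-- def find_optimal_indel_position(sequence, other_sequence):
--     position = 0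
--     MAX = -1
--
--     for x in range(len(sequence)):
--         sequence = insert_indel(sequence, x)
--         counter = count_matches(sequence, other_sequence)
--         sequence = remove_indel(sequence, x)
--
--         if counter > MAX:
--             MAX = counter
--             position = x
--
--     return position
-- ===== SOURCE B (Python) =====
-- def find_optimal_indel_position(sequence, other_sequence):
--     # O(n+m): maintain the match count for gap position x incrementally
--     # instead of rebuilding and rescanning the alignment for every x.
--     n, m = len(sequence), len(other_sequence)
--
--     def match(a, b):
--         return a.lower() == b.lower() and a != "-"
--
--     # count for inserting the gap at position 0: every sequence char is
--     # compared against the other sequence shifted one to the right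
--     cur = sum(1 for j in range(min(n, m - 1))
--               if match(sequence[j], other_sequence[j + 1]))
--
--     best, position = -1, 0
--     for x in range(n):
--         if cur > best:
--             best, position = cur, x
--         # moving the gap from x to x+1: position x now matches unshifted,
--         # and stops matching shifted
--         if x < m:
--             cur += match(sequence[x], other_sequence[x])
--         if x < m - 1:
--             cur -= match(sequence[x], other_sequence[x + 1])
--     return position
-- ===== Notes on version B (the rewrite author's own statement) =====
-- stated objective: faster
-- what changed: Instead of rebuilding the gapped string and rescanning the whole alignment for every gap position, B computes the shifted-match count once and then sweeps the gap position left to right, updating the match count in O(1) per position and taking the first argmax.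
import Mathlib
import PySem

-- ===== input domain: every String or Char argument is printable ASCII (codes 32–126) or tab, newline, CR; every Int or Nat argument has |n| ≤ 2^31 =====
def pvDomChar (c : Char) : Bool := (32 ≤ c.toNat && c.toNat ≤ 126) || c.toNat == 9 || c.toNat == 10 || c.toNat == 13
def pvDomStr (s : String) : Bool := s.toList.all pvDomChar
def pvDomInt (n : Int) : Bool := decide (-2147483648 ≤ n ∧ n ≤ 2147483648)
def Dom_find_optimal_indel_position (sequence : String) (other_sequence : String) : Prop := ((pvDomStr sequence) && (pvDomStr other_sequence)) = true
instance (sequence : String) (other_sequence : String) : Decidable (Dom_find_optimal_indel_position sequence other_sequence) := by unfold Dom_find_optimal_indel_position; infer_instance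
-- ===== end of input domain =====

-- B replaces A's rebuild-and-rescan per gap position by a single incremental sweep (faster).


-- ===== PORT A =====
-- sequence[:int(index)] + "-" + sequence[int(index):]
def pvInsertIndel (s : List Char) (i : Int) : List Char :=
  PySem.List.slice s none (some i) ++ ['-'] ++ PySem.List.slice s (some i) none

-- sequence[:int(index)] + sequence[int(index + 1):]
def pvRemoveIndel (s : List Char) (i : Int) : List Char :=
  PySem.List.slice s none (some i) ++ PySem.List.slice s (some (i + 1)) none

-- count_matches: loop over range(min(len,len)), condition in A's order
def pvCountMatches (s1 s2 : List Char) : Int :=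
  (PySem.List.pyRange 0 (min (s1.length : Int) (s2.length : Int)) 1).foldl
    (fun c x =>
      if (PySem.Chars.lowerChar (PySem.List.pyGetD s1 x ' ') ==
          PySem.Chars.lowerChar (PySem.List.pyGetD s2 x ' ')) &&
         (PySem.List.pyGetD s1 x ' ' != '-') then c + 1 else c) 0

def find_optimal_indel_position (sequence : String) (other_sequence : String) : Int :=
  let s := sequence.toList
  let o := other_sequence.toList
  -- state: (sequence, position, MAX); sequence is mutated and restored each iteration
  ((PySem.List.pyRange 0 (s.length : Int) 1).foldl
    (fun (st : List Char × Int × Int) x =>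
      let seq1 := pvInsertIndel st.1 x
      let counter := pvCountMatches seq1 o
      let seq2 := pvRemoveIndel seq1 x
      if counter > st.2.2 then (seq2, x, counter) else (seq2, st.2.1, st.2.2))
    (s, 0, -1)).2.1

-- ===== PORT B =====
def pvMatch (a b : Char) : Bool :=
  (PySem.Chars.lowerChar a == PySem.Chars.lowerChar b) && (a != '-')

def find_optimal_indel_position_alt (sequence : String) (other_sequence : String) : Int :=
  let s := sequence.toList
  let o := other_sequence.toList
  let n : Int := s.length
  let m : Int := o.length
  -- cur = sum(1 for j in range(min(n, m-1)) if match(s[j], o[j+1]))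
  let cur0 : Int := (PySem.List.pyRange 0 (min n (m - 1)) 1).foldl
      (fun c j =>
        if pvMatch (PySem.List.pyGetD s j ' ') (PySem.List.pyGetD o (j + 1) ' ') then c + 1 else c) 0
  -- state: (cur, best, position)
  ((PySem.List.pyRange 0 n 1).foldl
    (fun (st : Int × Int × Int) x =>
      let bp := if st.1 > st.2.1 then (st.1, x) else st.2
      let cur1 := if x < m then
          st.1 + (if pvMatch (PySem.List.pyGetD s x ' ') (PySem.List.pyGetD o x ' ') then 1 else 0)
        else st.1
      let cur2 := if x < m - 1 then
          cur1 - (if pvMatch (PySem.List.pyGetD s x ' ') (PySem.List.pyGetD o (x + 1) ' ') then 1 else 0)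
        else cur1
      (cur2, bp))
    (cur0, -1, 0)).2.2

-- ===== PRECONDITION & SPEC =====
def Spec_find_optimal_indel_position (sequence : String) (other_sequence : String) (out : Int) : Prop := out = find_optimal_indel_position_alt sequence other_sequence
instance (sequence : String) (other_sequence : String) (out : Int) : Decidable (Spec_find_optimal_indel_position sequence other_sequence out) := by unfold Spec_find_optimal_indel_position; infer_instance

-- ===== CLAIM (what is proved, stated in full; the proofs are below) =====
def Claim_equal_find_optimal_indel_position : Prop := ∀ (sequence : String) (other_sequence : String), Dom_find_optimal_indel_position sequence other_sequence → Spec_find_optimal_indel_position sequence other_sequence (find_optimal_indel_position sequence other_sequence)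



-- ===== LEMMAS AND PROOFS =====

-- Z: natural recursion computing count_matches
def pvZ : List Char → List Char → Int
  | [], _ => 0
  | _ :: _, [] => 0
  | a :: s, b :: t => (if pvMatch a b then 1 else 0) + pvZ s t

theorem pvZ_nil_right (s : List Char) : pvZ s [] = 0 := by
  cases s <;> simp [pvZ]

theorem pvZ_countP (s1 s2 : List Char) :
    pvZ s1 s2 = ((List.range (min s1.length s2.length)).countP
      (fun j => pvMatch (s1.getD j ' ') (s2.getD j ' ')) : Int) := by
  induction s1 generalizing s2 with
  | nil => simp [pvZ]
  | cons a s1 ih =>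
    cases s2 with
    | nil => simp [pvZ]
    | cons b s2 =>
      rw [pvZ, ih]
      have hmin : min (a :: s1).length (b :: s2).length = min s1.length s2.length + 1 := by
        simp [Nat.succ_min_succ]
      rw [hmin, List.range_succ_eq_map]
      simp [List.countP_cons, List.countP_map, Function.comp_def]
      split_ifs <;> omega

theorem pvCountMatches_eq (s1 s2 : List Char) : pvCountMatches s1 s2 = pvZ s1 s2 := by
  unfold pvCountMatches
  rw [PySem.List.pyRange_one, List.foldl_map, PySem.List.foldl_count_if, zero_add]
  have hmin : ((min (s1.length : Int) (s2.length : Int)) - 0).toNat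
      = min s1.length s2.length := by omega
  rw [hmin, pvZ_countP]
  congr 1
  apply List.countP_congr
  intro j _
  simp [pvMatch, PySem.List.pyGetD_natCast]

theorem pvInsert_eq (s : List Char) (k : Nat) :
    pvInsertIndel s (k : Int) = s.take k ++ '-' :: s.drop k := by
  unfold pvInsertIndel
  rw [PySem.List.slice_to s (by positivity), PySem.List.slice_from s (by positivity)]
  simp

theorem pvRemove_pvInsert (s : List Char) (k : Nat) (hk : k ≤ s.length) :
    pvRemoveIndel (pvInsertIndel s (k : Int)) (k : Int) = s := by
  rw [pvInsert_eq]
  unfold pvRemoveIndel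
  rw [PySem.List.slice_to _ (by positivity), PySem.List.slice_from _ (by positivity)]
  have hlen : (s.take k).length = k := by simp [hk]
  have hn1 : ((k:Int) + 1).toNat = k + 1 := by omega
  have hn0 : ((k:Int)).toNat = k := by omega
  rw [hn0, hn1]
  have htake : (s.take k ++ '-' :: s.drop k).take k = s.take k := by
    rw [List.take_append_of_le_length (by omega)]
    simp [Nat.min_eq_left hk]
  have hdrop : (s.take k ++ '-' :: s.drop k).drop (k + 1) = s.drop k := by
    rw [List.drop_append]
    simp [hlen]
  rw [htake, hdrop, List.take_append_drop]

theorem pvZ_insert (s o : List Char) (k : Nat) (hk : k ≤ s.length) :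
    pvZ (s.take k ++ '-' :: s.drop k) o = pvZ (s.take k) o + pvZ (s.drop k) (o.drop (k + 1)) := by
  induction k generalizing s o with
  | zero =>
    cases o with
    | nil => simp [pvZ_nil_right]
    | cons b o => simp [pvZ, pvMatch]
  | succ k ih =>
    cases s with
    | nil => simp at hk
    | cons a s =>
      cases o with
      | nil => simp [pvZ_nil_right]
      | cons b o =>
        simp only [List.take_succ_cons, List.drop_succ_cons, List.cons_append, pvZ]
        rw [ih s o (by simpa using hk)]
        ring

-- snoc recurrence for the aligned-prefix count
theorem pvZ_snoc (l o : List Char) (a : Char) :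
    pvZ (l ++ [a]) o
      = pvZ l o + (if l.length < o.length ∧ pvMatch a (o.getD l.length ' ') = true then 1 else 0) := by
  induction l generalizing o with
  | nil =>
    cases o with
    | nil => simp [pvZ]
    | cons b o => simp [pvZ]
  | cons c l ih =>
    cases o with
    | nil => simp [pvZ_nil_right]
    | cons b o =>
      simp only [List.cons_append, pvZ, ih, List.length_cons, List.getD_cons_succ]
      have hiff : l.length + 1 < o.length + 1 ↔ l.length < o.length := by omega
      simp only [hiff]
      ring

-- one step of the shifted-suffix count
theorem pvZ_drop_step (s o : List Char) (k : Nat) (hk : k < s.length) :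
    pvZ (s.drop k) (o.drop (k + 1))
      = (if k + 1 < o.length ∧ pvMatch (s.getD k ' ') (o.getD (k + 1) ' ') = true then 1 else 0)
        + pvZ (s.drop (k + 1)) (o.drop (k + 2)) := by
  have hs : s.drop k = s.getD k ' ' :: s.drop (k + 1) := by
    rw [List.drop_eq_getElem_cons hk]
    congr 1
    simp [List.getD, List.getElem?_eq_getElem hk]
  by_cases ho : k + 1 < o.length
  · have hodrop : o.drop (k + 1) = o.getD (k + 1) ' ' :: o.drop (k + 2) := by
      rw [List.drop_eq_getElem_cons ho]
      congr 1
      simp [List.getD, List.getElem?_eq_getElem ho]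
    rw [hs, hodrop, pvZ]
    simp [ho]
  · have h1 : o.drop (k + 1) = [] := List.drop_eq_nil_of_le (by omega)
    have h2 : o.drop (k + 2) = [] := List.drop_eq_nil_of_le (by omega)
    rw [h1, h2, pvZ_nil_right, pvZ_nil_right]
    simp [ho]

-- the match count with the gap at position k
def pvC (s o : List Char) (k : Nat) : Int :=
  pvZ (s.take k) o + pvZ (s.drop k) (o.drop (k + 1))

theorem pvCnt_eq_pvC (s o : List Char) (k : Nat) (hk : k ≤ s.length) :
    pvCountMatches (pvInsertIndel s (k : Int)) o = pvC s o k := by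
  rw [pvCountMatches_eq, pvInsert_eq, pvZ_insert s o k hk, pvC]

theorem pvC_succ (s o : List Char) (k : Nat) (hk : k < s.length) :
    pvC s o (k + 1)
      = pvC s o k
        + (if k < o.length ∧ pvMatch (s.getD k ' ') (o.getD k ' ') = true then 1 else 0)
        - (if k + 1 < o.length ∧ pvMatch (s.getD k ' ') (o.getD (k + 1) ' ') = true then 1 else 0) := by
  unfold pvC
  have h1 : s[k]?.toList = [s.getD k ' '] := by
    simp [List.getD, List.getElem?_eq_getElem hk]
  have htake : s.take (k + 1) = s.take k ++ [s.getD k ' '] := by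
    rw [List.take_add_one, h1]
  rw [htake, pvZ_snoc, pvZ_drop_step s o k hk]
  have hlen : (s.take k).length = k := by simp [Nat.le_of_lt hk]
  rw [hlen]
  ring

theorem pvC_zero (s o : List Char) : pvC s o 0 = pvZ s (o.drop 1) := by
  simp [pvC, pvZ]

-- B's initial sum equals the all-shifted count
theorem pvCur0_eq (s o : List Char) :
    ((List.range ((min (s.length : Int) ((o.length : Int) - 1)).toNat)).countP
        (fun j => pvMatch (s.getD j ' ') (o.getD (j + 1) ' ')) : Int)
      = pvZ s (o.drop 1) := by
  rw [pvZ_countP]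
  have hmin : (min (s.length : Int) ((o.length : Int) - 1)).toNat
      = min s.length (o.drop 1).length := by
    simp; omega
  rw [hmin]
  congr 1
  apply List.countP_congr
  intro j _
  have hd : (o.drop 1).getD j ' ' = o.getD (j + 1) ' ' := by
    simp [List.getD]
  rw [hd]

-- A's loop: the sequence is restored each iteration, and (position, MAX) is an argmax fold
theorem pvA_fold (s o : List Char) :
    ∀ (l : List Nat), (∀ j ∈ l, j < s.length) → ∀ (p M : Int),
      l.foldl
        (fun (st : List Char × Int × Int) (j : Nat) =>
          if pvCountMatches (pvInsertIndel st.1 (j : Int)) o > st.2.2 then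
            (pvRemoveIndel (pvInsertIndel st.1 (j : Int)) (j : Int), (j : Int),
              pvCountMatches (pvInsertIndel st.1 (j : Int)) o)
          else (pvRemoveIndel (pvInsertIndel st.1 (j : Int)) (j : Int), st.2.1, st.2.2))
        (s, p, M)
      = (s, l.foldl
          (fun (q : Int × Int) (j : Nat) => if pvC s o j > q.2 then ((j : Int), pvC s o j) else q)
          (p, M)) := by
  intro l
  induction l generalizing s with
  | nil => intro _ p M; rfl
  | cons j l ih =>
    intro hmem p M
    have hj : j < s.length := hmem j (List.mem_cons_self)
    have hcnt : pvCountMatches (pvInsertIndel s (j : Int)) o = pvC s o j :=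
      pvCnt_eq_pvC s o j (Nat.le_of_lt hj)
    have hrem : pvRemoveIndel (pvInsertIndel s (j : Int)) (j : Int) = s :=
      pvRemove_pvInsert s j (Nat.le_of_lt hj)
    simp only [List.foldl_cons, hcnt, hrem]
    by_cases h : pvC s o j > M
    · simp only [h, ite_true]
      exact ih s (fun x hx => hmem x (List.mem_cons_of_mem _ hx)) _ _
    · simp only [h, ite_false]
      exact ih s (fun x hx => hmem x (List.mem_cons_of_mem _ hx)) _ _

-- B's loop: cur tracks pvC, (best, position) is the mirrored argmax fold
theorem pvB_fold (s o : List Char) :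
    ∀ (len a : Nat), a + len ≤ s.length → ∀ (bp : Int × Int),
      (List.range' a len).foldl
        (fun (st : Int × Int × Int) (j : Nat) =>
          (if ((j : Nat) : Int) < (o.length : Int) - 1 then
              (if ((j : Nat) : Int) < (o.length : Int) then
                st.1 + (if pvMatch (s.getD j ' ') (o.getD j ' ') then 1 else 0)
              else st.1)
                - (if pvMatch (s.getD j ' ') (o.getD (j + 1) ' ') then 1 else 0)
            else (if ((j : Nat) : Int) < (o.length : Int) then
                st.1 + (if pvMatch (s.getD j ' ') (o.getD j ' ') then 1 else 0)
              else st.1),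
           if st.1 > st.2.1 then (st.1, ((j : Nat) : Int)) else st.2))
        (pvC s o a, bp)
      = (pvC s o (a + len),
         (List.range' a len).foldl
           (fun (q : Int × Int) (j : Nat) => if pvC s o j > q.1 then (pvC s o j, (j : Int)) else q)
           bp) := by
  intro len
  induction len with
  | zero => intro a _ bp; rfl
  | succ len ih =>
    intro a ha bp
    rw [List.range'_succ]
    simp only [List.foldl_cons]
    have hstep : (if ((a : Nat) : Int) < (o.length : Int) - 1 then
            (if ((a : Nat) : Int) < (o.length : Int) then
              pvC s o a + (if pvMatch (s.getD a ' ') (o.getD a ' ') then 1 else 0)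
            else pvC s o a)
              - (if pvMatch (s.getD a ' ') (o.getD (a + 1) ' ') then 1 else 0)
          else (if ((a : Nat) : Int) < (o.length : Int) then
              pvC s o a + (if pvMatch (s.getD a ' ') (o.getD a ' ') then 1 else 0)
            else pvC s o a)) = pvC s o (a + 1) := by
      rw [pvC_succ s o a (by omega)]
      have g1 : (((a : Nat) : Int) < (o.length : Int)) ↔ a < o.length := by omega
      have g2 : (((a : Nat) : Int) < (o.length : Int) - 1) ↔ a + 1 < o.length := by omega
      simp only [g1, g2]
      split_ifs <;> (try ring) <;> (exfalso; tauto)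
    rw [hstep]
    have hlen : a + (len + 1) = (a + 1) + len := by omega
    rw [hlen, ih (a + 1) (by omega)]

-- the two argmax folds are mirror images of each other
theorem pvSwap_fold (f : Nat → Int) :
    ∀ (l : List Nat) (p b : Int),
      l.foldl (fun (q : Int × Int) (j : Nat) => if f j > q.2 then ((j : Int), f j) else q) (p, b)
        = ((l.foldl (fun (q : Int × Int) (j : Nat) => if f j > q.1 then (f j, (j : Int)) else q) (b, p)).2,
           (l.foldl (fun (q : Int × Int) (j : Nat) => if f j > q.1 then (f j, (j : Int)) else q) (b, p)).1) := by
  intro l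
  induction l with
  | nil => intro p b; rfl
  | cons j l ih =>
    intro p b
    simp only [List.foldl_cons]
    by_cases h : f j > b
    · simp only [h, ite_true]; exact ih _ _
    · simp only [h, ite_false]; exact ih _ _

-- A's port reduced to the abstract argmax fold
theorem pvA_eq (sequence other_sequence : String) :
    find_optimal_indel_position sequence other_sequence
      = ((List.range sequence.toList.length).foldl
          (fun (q : Int × Int) (j : Nat) =>
            if pvC sequence.toList other_sequence.toList j > q.2
            then ((j : Int), pvC sequence.toList other_sequence.toList j) else q)
          (0, -1)).1 := by
  unfold find_optimal_indel_position
  simp only [PySem.List.pyRange_one, List.foldl_map, zero_add, sub_zero, Int.toNat_natCast]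
  rw [pvA_fold sequence.toList other_sequence.toList (List.range sequence.toList.length)
      (fun j hj => List.mem_range.mp hj) 0 (-1)]

-- B's port reduced to the mirrored argmax fold
theorem pvB_eq (sequence other_sequence : String) :
    find_optimal_indel_position_alt sequence other_sequence
      = ((List.range sequence.toList.length).foldl
          (fun (q : Int × Int) (j : Nat) =>
            if pvC sequence.toList other_sequence.toList j > q.1
            then (pvC sequence.toList other_sequence.toList j, (j : Int)) else q)
          (-1, 0)).2 := by
  unfold find_optimal_indel_position_alt
  simp only [PySem.List.pyRange_one, List.foldl_map, zero_add, sub_zero, Int.toNat_natCast,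
    ← Nat.cast_add_one, PySem.List.pyGetD_natCast]
  rw [PySem.List.foldl_count_if, zero_add, pvCur0_eq, ← pvC_zero]
  rw [List.range_eq_range']
  rw [pvB_fold sequence.toList other_sequence.toList sequence.toList.length 0 (by omega) (-1, 0)]

-- ===== VERDICT (by name: the statement is the Claim_ definition above) =====
theorem find_optimal_indel_position_spec : Claim_equal_find_optimal_indel_position := by
  intro sequence other_sequence _
  unfold Spec_find_optimal_indel_position
  rw [pvA_eq, pvB_eq, pvSwap_fold]
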